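-- pv_equiv track=rewrite | github.com/Prudvi01/BiopicAnalysis | averageanalysis.py | findmarkers
-- ===== SOURCE A (Python) =====
-- def findmarkers(item):
--     markers = [0,0,0,0,0] # [120 days start, 60 days start, movie release, 60 end, 120 end]
--     for i, item in enumerate(item):
--         if item == '120 days start':
--             markers[0] = i
--         if item == '60 days start':
--             markers[1] = i
--         if item == 'reviafterrelease':
--             markers[2] = i
--         if item == '60 days end':
--             markers[3] = i
--         if item == '120 days end':
--             markers[4] = i
--     if markers[3] == 0:
--         markers[3] = i
--     if markers[4] == 0:
--         markers[4] = i
--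
--
--     return markers
-- ===== SOURCE B (Python) =====
-- def findmarkers(item):
--     # staged: five independent back-to-front searches; first hit from the rear
--     # is the last occurrence, 0 if absent (as in A's untouched initial slot).
--     def last_index(key):
--         for j, x in reversed(list(enumerate(item))):
--             if x == key:
--                 return j
--         return 0
--     m = [last_index(k) for k in
--          ('120 days start', '60 days start', 'reviafterrelease',
--           '60 days end', '120 days end')]
--     for k in (3, 4):
--         if m[k] == 0:
--             m[k] = len(item) - 1
--     return m
-- ===== Notes on version B (the rewrite author's own statement) =====
-- stated objective: alternative
-- what changed: Replaces A's single forward pass that keeps five last-write accumulators by five staged back-to-front searches (first match scanning from the rear is the last occurrence), then applies the '== 0' override for the two end markers using len(item)-1.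
-- outside the precondition, e.g. on findmarkers([]): A raises NameError, B returns [0, 0, 0, -1, -1]
import Mathlib
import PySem

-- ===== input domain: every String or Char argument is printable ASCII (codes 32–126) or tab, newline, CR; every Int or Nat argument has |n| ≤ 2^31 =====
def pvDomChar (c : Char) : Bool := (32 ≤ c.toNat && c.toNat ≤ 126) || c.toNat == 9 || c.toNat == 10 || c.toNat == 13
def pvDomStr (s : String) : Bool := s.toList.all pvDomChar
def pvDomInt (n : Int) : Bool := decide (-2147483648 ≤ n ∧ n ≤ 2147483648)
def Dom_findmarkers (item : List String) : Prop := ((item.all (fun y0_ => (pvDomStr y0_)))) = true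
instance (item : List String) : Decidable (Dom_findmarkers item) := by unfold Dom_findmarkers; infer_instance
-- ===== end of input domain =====

-- B replaces A's single forward pass (five last-write accumulators) by five staged
-- back-to-front searches for the last occurrence (alternative decomposition; same cost).

-- ===== PORT A =====
-- A's `i` is unbound before the loop; Pre_ excludes the empty list, where A raises.
def findmarkers (item : List String) : List Int :=
  let st := (PySem.List.enumerate item).foldl
    (fun (st : Int × Int × Int × Int × Int × Int) p =>
      let m0 := if p.2 = "120 days start" then p.1 else st.1
      let m1 := if p.2 = "60 days start" then p.1 else st.2.1
      let m2 := if p.2 = "reviafterrelease" then p.1 else st.2.2.1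
      let m3 := if p.2 = "60 days end" then p.1 else st.2.2.2.1
      let m4 := if p.2 = "120 days end" then p.1 else st.2.2.2.2.1
      (m0, m1, m2, m3, m4, p.1))
    (0, 0, 0, 0, 0, 0)
  let m3 := if st.2.2.2.1 = 0 then st.2.2.2.2.2 else st.2.2.2.1
  let m4 := if st.2.2.2.2.1 = 0 then st.2.2.2.2.2 else st.2.2.2.2.1
  [st.1, st.2.1, st.2.2.1, m3, m4]

-- ===== PORT B =====
-- Source B's last_index: scan reversed(list(enumerate(item))), return first match, else 0.
def lastIndexB (l : List (Int × String)) (key : String) : Int :=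
  match l with
  | [] => 0
  | p :: t => if p.2 = key then p.1 else lastIndexB t key

def findmarkers_alt (item : List String) : List Int :=
  let rev := (PySem.List.enumerate item).reverse
  let m := ["120 days start", "60 days start", "reviafterrelease",
            "60 days end", "120 days end"].map (lastIndexB rev)
  -- indices 3 and 4 are literal and in range, so plain getD/set are exact here
  [(3 : Nat), 4].foldl
    (fun (m : List Int) k =>
      if m.getD k 0 = 0 then m.set k ((item.length : Int) - 1) else m) m

-- ===== PRECONDITION & SPEC =====
-- A raises NameError on the empty list (the post-loop override reads the unbound loop variable i).
def Pre_findmarkers (item : List String) : Prop := item ≠ []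
instance (item : List String) : Decidable (Pre_findmarkers item) := by unfold Pre_findmarkers; infer_instance
def pvWitness_findmarkers : List String := ["a", "60 days end"]

def Spec_findmarkers (item : List String) (out : List Int) : Prop := out = findmarkers_alt item
instance (item : List String) (out : List Int) : Decidable (Spec_findmarkers item out) := by unfold Spec_findmarkers; infer_instance

-- ===== CLAIM (what is proved, stated in full; the proofs are below) =====
def Claim_equal_findmarkers : Prop := ∀ (item : List String), Dom_findmarkers item → Pre_findmarkers item → Spec_findmarkers item (findmarkers item)

-- ===== LEMMAS AND PROOFS =====

-- A's 6-tuple fold splits into five independent last-write folds plus the index fold.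
lemma splitFold (l : List (Int × String)) (m0 m1 m2 m3 m4 i0 : Int) :
    l.foldl
      (fun (st : Int × Int × Int × Int × Int × Int) p =>
        let m0 := if p.2 = "120 days start" then p.1 else st.1
        let m1 := if p.2 = "60 days start" then p.1 else st.2.1
        let m2 := if p.2 = "reviafterrelease" then p.1 else st.2.2.1
        let m3 := if p.2 = "60 days end" then p.1 else st.2.2.2.1
        let m4 := if p.2 = "120 days end" then p.1 else st.2.2.2.2.1
        (m0, m1, m2, m3, m4, p.1))
      (m0, m1, m2, m3, m4, i0) =
    (l.foldl (fun a p => if p.2 = "120 days start" then p.1 else a) m0,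
     l.foldl (fun a p => if p.2 = "60 days start" then p.1 else a) m1,
     l.foldl (fun a p => if p.2 = "reviafterrelease" then p.1 else a) m2,
     l.foldl (fun a p => if p.2 = "60 days end" then p.1 else a) m3,
     l.foldl (fun a p => if p.2 = "120 days end" then p.1 else a) m4,
     l.foldl (fun (_ : Int) p => p.1) i0) := by
  induction l generalizing m0 m1 m2 m3 m4 i0 with
  | nil => rfl
  | cons p t ih => simp only [List.foldl_cons]; exact ih _ _ _ _ _ _

-- last-write forward fold = first-match scan of the reversed list (B's search).
lemma lastWrite_eq_revScan (l : List (Int × String)) (key : String) :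
    l.foldl (fun a p => if p.2 = key then p.1 else a) 0 = lastIndexB l.reverse key := by
  induction l using List.reverseRecOn with
  | nil => rfl
  | append_singleton t p ih =>
    rw [List.foldl_append, List.reverse_append]
    simp only [List.foldl_cons, List.foldl_nil, List.reverse_singleton,
      List.singleton_append, lastIndexB]
    split_ifs with h
    · rfl
    · exact ih

-- A's final loop variable over a nonempty list is its last index, len - 1.
lemma lastIdx (xs : List String) (hne : xs ≠ []) (s : Int) :
    (PySem.List.enumerate xs s).foldl (fun (_ : Int) p => p.1) 0 = s + (xs.length : Int) - 1 := by
  induction xs generalizing s with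
  | nil => exact absurd rfl hne
  | cons x t ih =>
    rcases t with _ | ⟨y, t'⟩
    · simp [PySem.List.enumerate_cons, PySem.List.enumerate_nil]
    · have h := ih (by simp) (s + 1)
      simp only [PySem.List.enumerate_cons, List.foldl_cons] at h ⊢
      rw [h]
      simp only [List.length_cons]
      push_cast
      ring

-- ===== VERDICT (by name: the statement is the Claim_ definition above) =====
theorem findmarkers_spec : Claim_equal_findmarkers := by
  intro item _ hpre
  unfold Spec_findmarkers findmarkers findmarkers_alt
  rw [splitFold, lastIdx item hpre 0]
  simp only [lastWrite_eq_revScan, List.map, List.foldl_cons, List.foldl_nil,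
    List.getD, List.getElem?_cons_succ, List.getElem?_cons_zero, Option.getD_some]
  split_ifs <;> simp_all [List.set]
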